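-- pv_equiv track=rewrite | github.com/Alburrito/connect3 | connect3/connect3.py | comprobar_columnas
-- ===== SOURCE A (Python) =====
-- DIM = 3
--
-- WIN = 3
--
-- def comprobar_columnas(tablero, ficha_turno):
--     for columna in range(DIM):
--         contador = 0
--         for fila in range(DIM):
--             if tablero[fila][columna] == ficha_turno:
--                 contador += 1
--             else:
--                 contador = 0
--             if contador == WIN:
--                 return True
--     return False
-- ===== SOURCE B (Python) =====
-- DIM = 3
--
-- WIN = 3
--
-- def comprobar_columnas(tablero, ficha_turno):
--     return any(all(tablero[fila][columna] == ficha_turno for fila in range(DIM))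
--                for columna in range(DIM))
-- ===== Notes on version B (the rewrite author's own statement) =====
-- stated objective: simpler
-- what changed: B replaces the run-length counter with its reset/early-return logic by a per-column conjunction (any column uniformly equal to ficha_turno), valid because WIN == DIM.
-- outside the precondition, e.g. on comprobar_columnas([['X'], ['X'], ['X']], 'X'): A returns True, B returns True
import Mathlib
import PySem

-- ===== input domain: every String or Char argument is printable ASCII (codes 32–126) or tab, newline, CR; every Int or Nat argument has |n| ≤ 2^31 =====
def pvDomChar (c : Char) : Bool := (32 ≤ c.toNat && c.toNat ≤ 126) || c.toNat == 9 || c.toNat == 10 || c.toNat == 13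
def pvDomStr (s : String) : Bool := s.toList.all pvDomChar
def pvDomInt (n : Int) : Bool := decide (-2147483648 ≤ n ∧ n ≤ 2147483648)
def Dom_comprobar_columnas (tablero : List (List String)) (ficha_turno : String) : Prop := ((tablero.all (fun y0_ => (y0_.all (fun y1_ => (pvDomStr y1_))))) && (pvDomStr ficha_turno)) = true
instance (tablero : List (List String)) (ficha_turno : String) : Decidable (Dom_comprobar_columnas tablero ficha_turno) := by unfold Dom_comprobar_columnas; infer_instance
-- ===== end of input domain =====

-- B replaces A's consecutive-match counter (with reset and early return) by a per-column
-- "all cells equal ficha_turno" conjunction; equal because WIN == DIM == 3.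

-- ===== PORT A =====
-- tablero[fila][columna]; total via getD — inside Pre_ every access is in range
def pvCell (tablero : List (List String)) (fila columna : Int) : String :=
  PySem.List.pyGetD (PySem.List.pyGetD tablero fila []) columna ""

-- the inner 'for fila' loop: state = (returned-True?, contador); 'return True' latches
def comprobar_columnas (tablero : List (List String)) (ficha_turno : String) : Bool :=
  (PySem.List.pyRange 0 3 1).foldl (fun acc columna =>
    if acc then acc else
      ((PySem.List.pyRange 0 3 1).foldl (fun (st : Bool × Int) fila =>
        if st.1 then st else
          let contador : Int := if pvCell tablero fila columna == ficha_turno then st.2 + 1 else 0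
          (contador == 3, contador)) (false, 0)).1) false

-- ===== PORT B =====
def comprobar_columnas_alt (tablero : List (List String)) (ficha_turno : String) : Bool :=
  (PySem.List.pyRange 0 3 1).any (fun columna =>
    (PySem.List.pyRange 0 3 1).all (fun fila =>
      pvCell tablero fila columna == ficha_turno))

-- ===== PRECONDITION & SPEC =====
-- Pre_: a fully indexable 3×3 prefix. Off it A raises IndexError, except when a winning
-- column makes A return True before it touches a missing cell — there B also returns True.
def Pre_comprobar_columnas (tablero : List (List String)) (ficha_turno : String) : Prop :=
  3 ≤ tablero.length ∧ ∀ r ∈ tablero.take 3, 3 ≤ r.length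
instance (tablero : List (List String)) (ficha_turno : String) : Decidable (Pre_comprobar_columnas tablero ficha_turno) := by unfold Pre_comprobar_columnas; infer_instance
def pvWitness_comprobar_columnas : List (List String) × String :=
  ([["X","O","X"],["O","X","O"],["X","O","X"]], "X")

def Spec_comprobar_columnas (tablero : List (List String)) (ficha_turno : String) (out : Bool) : Prop := out = comprobar_columnas_alt tablero ficha_turno
instance (tablero : List (List String)) (ficha_turno : String) (out : Bool) : Decidable (Spec_comprobar_columnas tablero ficha_turno out) := by unfold Spec_comprobar_columnas; infer_instance

-- ===== CLAIM (what is proved, stated in full; the proofs are below) =====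
def Claim_equal_comprobar_columnas : Prop := ∀ (tablero : List (List String)) (ficha_turno : String), Dom_comprobar_columnas tablero ficha_turno → Pre_comprobar_columnas tablero ficha_turno → Spec_comprobar_columnas tablero ficha_turno (comprobar_columnas tablero ficha_turno)

-- ===== LEMMAS AND PROOFS =====

-- both sides on a concrete 3×3 prefix, as boolean formulas in the nine cell comparisons
lemma pvGetD1 {α : Type} (x y : α) (xs : List α) (d : α) :
    PySem.List.pyGetD (x :: y :: xs) 1 d = y := by
  simp [PySem.List.pyGetD, PySem.List.pyGet?, PySem.List.pyIdx?]

lemma pvGetD2 {α : Type} (x y z : α) (xs : List α) (d : α) :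
    PySem.List.pyGetD (x :: y :: z :: xs) 2 d = z := by
  simp [PySem.List.pyGetD, PySem.List.pyGet?, PySem.List.pyIdx?]
  rw [if_pos (by omega)]; simp

lemma key (a b c d e f g h i : String) (t0 t1 t2 : List String)
    (rest : List (List String)) (fic : String) :
    comprobar_columnas ((a::b::c::t0)::(d::e::f::t1)::(g::h::i::t2)::rest) fic
      = comprobar_columnas_alt ((a::b::c::t0)::(d::e::f::t1)::(g::h::i::t2)::rest) fic := by
  have hr : PySem.List.pyRange 0 3 1 = [0, 1, 2] := by decide
  simp only [comprobar_columnas, comprobar_columnas_alt, hr, List.foldl, List.any, List.all,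
    pvCell, PySem.List.pyGetD_zero_cons, pvGetD1, pvGetD2]
  generalize (a == fic) = e1
  generalize (b == fic) = e2
  generalize (c == fic) = e3
  generalize (d == fic) = e4
  generalize (e == fic) = e5
  generalize (f == fic) = e6
  generalize (g == fic) = e7
  generalize (h == fic) = e8
  generalize (i == fic) = e9
  revert e1 e2 e3 e4 e5 e6 e7 e8 e9
  decide

-- ===== VERDICT (by name: the statement is the Claim_ definition above) =====
theorem comprobar_columnas_spec : Claim_equal_comprobar_columnas := by
  intro tablero fic _ hpre
  unfold Spec_comprobar_columnas
  obtain ⟨hlen, hrows⟩ := hpre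
  match tablero, hlen with
  | r0 :: r1 :: r2 :: rest, _ =>
    have h0 := hrows r0 (by simp)
    have h1 := hrows r1 (by simp)
    have h2 := hrows r2 (by simp)
    match r0, h0 with
    | a :: b :: c :: t0, _ =>
      match r1, h1 with
      | d :: e :: f :: t1, _ =>
        match r2, h2 with
        | g :: h :: i :: t2, _ => exact key a b c d e f g h i t0 t1 t2 rest fic
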